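-- pv_equiv track=rewrite | github.com/romeo111/OpenOnco | knowledge_base/engine/mdt_orchestrator.py | _normalize_observation_key
-- ===== SOURCE A (Python) =====
-- def _normalize_observation_key(key: str) -> str:
--     normalized = []
--     previous_was_sep = False
--     for ch in key.strip():
--         if ch.isalnum():
--             normalized.append(ch.lower())
--             previous_was_sep = False
--         elif not previous_was_sep:
--             normalized.append("_")
--             previous_was_sep = True
--     return "".join(normalized).strip("_")
-- ===== SOURCE B (Python) =====
-- def _normalize_observation_key(key: str) -> str:
--     cleaned = "".join(c.lower() if c.isalnum() else " " for c in key.strip())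
--     return "_".join(cleaned.split())
-- ===== Notes on version B (the rewrite author's own statement) =====
-- stated objective: simpler
-- what changed: Replaces A's character loop with its previous_was_sep flag and post-hoc underscore stripping by a map/split/join pipeline: map every non-alphanumeric character to a space (alnums to their lowercase), split the result into words, and join the words with underscores, which collapses separator runs and trims the ends in one idiomatic step.
import Mathlib
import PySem

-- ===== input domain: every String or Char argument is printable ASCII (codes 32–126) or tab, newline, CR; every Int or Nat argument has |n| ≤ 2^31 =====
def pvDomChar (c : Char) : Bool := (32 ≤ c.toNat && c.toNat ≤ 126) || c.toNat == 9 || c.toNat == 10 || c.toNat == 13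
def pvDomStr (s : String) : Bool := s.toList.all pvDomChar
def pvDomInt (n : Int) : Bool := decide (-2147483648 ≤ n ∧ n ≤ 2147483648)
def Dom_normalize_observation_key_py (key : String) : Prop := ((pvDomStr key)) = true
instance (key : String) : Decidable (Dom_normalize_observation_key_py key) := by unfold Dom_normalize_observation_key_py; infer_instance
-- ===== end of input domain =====

-- B replaces A's flag-driven character loop by a map/split/join pipeline (map non-alnum chars
-- to spaces, then '_'.join(s.split())); objective: simpler, same O(n) cost.

-- ===== PORT A =====
-- one loop step of A: st = (normalized, previous_was_sep)
def pvStepA (st : List Char × Bool) (ch : Char) : List Char × Bool :=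
  if PySem.Chars.isalnum ch then (st.1 ++ [PySem.Chars.lowerChar ch], false)
  else if !st.2 then (st.1 ++ ['_'], true)
  else st

def normalize_observation_key_py (key : String) : String :=
  let st := (PySem.Str.strip key).toList.foldl pvStepA ([], false)
  String.ofList (PySem.Chars.stripChars st.1 ['_'])

-- ===== PORT B =====
-- per-character map: c.lower() if c.isalnum() else ' '
def pvF (c : Char) : Char :=
  if PySem.Chars.isalnum c then PySem.Chars.lowerChar c else ' '

def normalize_observation_key_py_alt (key : String) : String :=
  let cleaned : List Char := (PySem.Str.strip key).toList.map pvF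
  String.ofList (PySem.Chars.join ['_'] (PySem.Chars.split₀ cleaned))

-- ===== PRECONDITION & SPEC =====
def Spec_normalize_observation_key_py (key : String) (out : String) : Prop := out = normalize_observation_key_py_alt key
instance (key : String) (out : String) : Decidable (Spec_normalize_observation_key_py key out) := by unfold Spec_normalize_observation_key_py; infer_instance

-- ===== CLAIM (what is proved, stated in full; the proofs are below) =====
def Claim_equal_normalize_observation_key_py : Prop := ∀ (key : String), Dom_normalize_observation_key_py key → Spec_normalize_observation_key_py key (normalize_observation_key_py key)

-- ===== LEMMAS AND PROOFS =====

-- ---- proof-only helpers ----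

-- maximal alphanumeric runs of a character list
def runsL : List Char → List (List Char)
  | [] => []
  | c :: cs =>
    if PySem.Chars.isalnum c then
      (c :: cs.takeWhile PySem.Chars.isalnum) :: runsL (cs.dropWhile PySem.Chars.isalnum)
    else runsL cs
termination_by cs => cs.length
decreasing_by
  · have := cs.length_dropWhile_le PySem.Chars.isalnum
    simp; omega
  · simp

-- A's loop body as a structural recursion on the remaining input
def bodyA : List Char → Bool → List Char
  | [], _ => []
  | c :: cs, prev =>
    if PySem.Chars.isalnum c then PySem.Chars.lowerChar c :: bodyA cs false
    else if !prev then '_' :: bodyA cs true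
    else bodyA cs prev

-- does the list end in a non-alnum character?
def endsSep (cs : List Char) : Bool :=
  match cs.getLast? with
  | some c => !PySem.Chars.isalnum c
  | none => false

-- join ['_'] of the lowered runs: the value both programs reach
def canon (cs : List Char) : List Char :=
  PySem.Chars.join ['_'] ((runsL cs).map (List.map PySem.Chars.lowerChar))

-- ---- character facts ----

theorem charLe (a b : Char) : (a ≤ b) ↔ a.toNat ≤ b.toNat := Iff.rfl

theorem isalnum_iff (c : Char) : PySem.Chars.isalnum c = true ↔
    (48 ≤ c.toNat ∧ c.toNat ≤ 57) ∨ (65 ≤ c.toNat ∧ c.toNat ≤ 90) ∨ (97 ≤ c.toNat ∧ c.toNat ≤ 122) := by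
  simp [PySem.Chars.isalnum, PySem.Chars.isalpha, PySem.Chars.isdigit, PySem.Chars.isupper,
    PySem.Chars.islower, charLe]
  omega

theorem lower_spec (c : Char) (h : PySem.Chars.isalnum c = true) :
    PySem.Chars.lowerChar c ≠ '_' ∧ PySem.Chars.isspace (PySem.Chars.lowerChar c) = false := by
  rw [isalnum_iff] at h
  unfold PySem.Chars.lowerChar
  split
  · rename_i hu
    simp [PySem.Chars.isupper, charLe] at hu
    have hv : (c.toNat + 32).isValidChar := Or.inl (by omega)
    have ht : (Char.ofNat (c.toNat + 32)).toNat = c.toNat + 32 := by rw [Char.toNat_ofNat, if_pos hv]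
    have h95 : ('_' : Char).toNat = 95 := rfl
    refine ⟨fun he => ?_, ?_⟩
    · have : (Char.ofNat (c.toNat + 32)).toNat = ('_' : Char).toNat := by rw [he]
      rw [ht, h95] at this; omega
    · simp [PySem.Chars.isspace, ht]; omega
  · rename_i hu
    simp [PySem.Chars.isupper, charLe] at hu
    have h95 : ('_' : Char).toNat = 95 := rfl
    refine ⟨fun he => ?_, ?_⟩
    · have : c.toNat = ('_' : Char).toNat := by rw [he]
      rw [h95] at this; omega
    · simp [PySem.Chars.isspace]; omega

theorem pvF_space (c : Char) (h : PySem.Chars.isalnum c = false) : pvF c = ' ' := by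
  simp [pvF, h]

theorem pvF_alnum (c : Char) (h : PySem.Chars.isalnum c = true) : pvF c = PySem.Chars.lowerChar c := by
  simp [pvF, h]

theorem isspace_space : PySem.Chars.isspace ' ' = true := by decide

-- ---- runsL facts ----

theorem runsL_all_alnum : ∀ cs, ∀ r ∈ runsL cs, r ≠ [] ∧ ∀ c ∈ r, PySem.Chars.isalnum c = true := by
  intro cs
  induction cs using runsL.induct with
  | case1 => simp [runsL]
  | case2 c cs h ih =>
    intro r hr
    rw [runsL, if_pos h] at hr
    rw [List.mem_cons] at hr
    rcases hr with hr | hr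
    · subst hr
      refine ⟨by simp, ?_⟩
      intro x hx
      rw [List.mem_cons] at hx
      rcases hx with hx | hx
      · exact hx ▸ h
      · exact List.mem_takeWhile_imp hx
    · exact ih r hr
  | case3 c cs h ih =>
    intro r hr
    rw [runsL, if_neg h] at hr
    exact ih r hr

theorem runsL_nil_iff (cs : List Char) :
    runsL cs = [] ↔ ∀ c ∈ cs, PySem.Chars.isalnum c = false := by
  induction cs using runsL.induct with
  | case1 => simp [runsL]
  | case2 c cs h ih => simp [runsL, h]
  | case3 c cs h ih =>
    rw [runsL, if_neg h]
    simp only [Bool.not_eq_true] at h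
    simp [ih, h]

theorem runsL_cons_sep (c : Char) (cs : List Char) (h : PySem.Chars.isalnum c = false) :
    runsL (c :: cs) = runsL cs := by
  rw [runsL, if_neg (by simp [h])]

-- ---- endsSep facts ----

theorem intercalate_cc (s a b : List Char) (L : List (List Char)) :
    s.intercalate (a :: b :: L) = a ++ s ++ s.intercalate (b :: L) := by
  simp [List.intercalate, List.intersperse]

theorem endsSep_cons (c : Char) (cs : List Char) (h : cs ≠ []) :
    endsSep (c :: cs) = endsSep cs := by
  unfold endsSep
  rw [show c :: cs = [c] ++ cs from rfl, List.getLast?_append_of_ne_nil _ h]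

theorem endsSep_append_right (t cs : List Char) (h : cs ≠ []) :
    endsSep (t ++ cs) = endsSep cs := by
  unfold endsSep
  rw [List.getLast?_append_of_ne_nil _ h]

theorem endsSep_all_alnum (t : List Char) (hne : t ≠ [])
    (h : ∀ c ∈ t, PySem.Chars.isalnum c = true) : endsSep t = false := by
  unfold endsSep
  match ht : t.getLast? with
  | none => rfl
  | some c =>
    have : c ∈ t := List.mem_of_getLast? ht
    simp [h c this]

theorem endsSep_all_sep (t : List Char) (hne : t ≠ [])
    (h : ∀ c ∈ t, PySem.Chars.isalnum c = false) : endsSep t = true := by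
  unfold endsSep
  match ht : t.getLast? with
  | none => exact absurd (List.getLast?_eq_none_iff.mp ht) hne
  | some c =>
    have : c ∈ t := List.mem_of_getLast? ht
    simp [h c this]

-- ---- canon / join facts ----

theorem canon_nil_of_runsL_nil (cs : List Char) (h : runsL cs = []) : canon cs = [] := by
  simp [canon, h, PySem.Chars.join, List.intercalate]

theorem canon_cons_sep (c : Char) (cs : List Char) (h : PySem.Chars.isalnum c = false) :
    canon (c :: cs) = canon cs := by
  simp [canon, runsL_cons_sep c cs h]

theorem join_head (L : List (List Char)) (hne : ∀ r ∈ L, r ≠ [])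
    (hu : ∀ r ∈ L, ∀ c ∈ r, c ≠ '_') (h : L ≠ []) :
    ∃ c t, PySem.Chars.join ['_'] L = c :: t ∧ c ≠ '_' := by
  match L with
  | [] => exact absurd rfl h
  | a :: L' =>
    match ha : a with
    | [] => exact absurd rfl (ha ▸ hne a (by simp [ha]))
    | c :: a' =>
      have hc : c ≠ '_' := hu a (by simp [ha]) c (by simp [ha])
      match L' with
      | [] => exact ⟨c, a', by simp [PySem.Chars.join, List.intercalate], hc⟩
      | b :: L'' =>
        refine ⟨c, a' ++ '_' :: PySem.Chars.join ['_'] (b :: L''), ?_, hc⟩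
        simp [PySem.Chars.join, intercalate_cc]

theorem join_last (L : List (List Char)) (hne : ∀ r ∈ L, r ≠ [])
    (hu : ∀ r ∈ L, ∀ c ∈ r, c ≠ '_') (h : L ≠ []) :
    ∃ c t, (PySem.Chars.join ['_'] L).reverse = c :: t ∧ c ≠ '_' := by
  match L with
  | [] => exact absurd rfl h
  | a :: L' =>
    match L' with
    | [] =>
      have hane : a ≠ [] := hne a (by simp)
      match har : a.reverse with
      | [] => exact absurd (by simpa using har) hane
      | c :: t =>
        have hc : c ∈ a := by
          have : c ∈ a.reverse := by simp [har]
          simpa using this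
        exact ⟨c, t, by simpa [PySem.Chars.join, List.intercalate] using har,
          hu a (by simp) c hc⟩
    | b :: L'' =>
      obtain ⟨c, t, hct, hc⟩ := join_last (b :: L'') (fun r hr => hne r (by simp [hr]))
        (fun r hr => hu r (by simp [hr])) (by simp)
      refine ⟨c, t ++ ('_' :: a.reverse), ?_, hc⟩
      have : PySem.Chars.join ['_'] (a :: b :: L'') = a ++ '_' :: PySem.Chars.join ['_'] (b :: L'') := by
        simp [PySem.Chars.join, intercalate_cc]
      rw [this]
      simp [hct]

theorem canon_ends (cs : List Char) (h : runsL cs ≠ []) :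
    (∃ c t, canon cs = c :: t ∧ c ≠ '_') ∧
    (∃ c t, (canon cs).reverse = c :: t ∧ c ≠ '_') := by
  have hne : ∀ r ∈ (runsL cs).map (List.map PySem.Chars.lowerChar), r ≠ [] := by
    intro r hr
    rw [List.mem_map] at hr
    obtain ⟨s, hs, rfl⟩ := hr
    have := (runsL_all_alnum cs s hs).1
    simpa using this
  have hu : ∀ r ∈ (runsL cs).map (List.map PySem.Chars.lowerChar), ∀ c ∈ r, c ≠ '_' := by
    intro r hr c hc
    rw [List.mem_map] at hr
    obtain ⟨s, hs, rfl⟩ := hr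
    rw [List.mem_map] at hc
    obtain ⟨x, hx, rfl⟩ := hc
    exact (lower_spec x ((runsL_all_alnum cs s hs).2 x hx)).1
  have hLne : (runsL cs).map (List.map PySem.Chars.lowerChar) ≠ [] := by simpa using h
  exact ⟨join_head _ hne hu hLne, join_last _ hne hu hLne⟩

-- ---- B-side: split₀ of the mapped string yields the lowered runs ----

theorem go_nil (cur : List Char) (acc : List (List Char)) :
    PySem.Chars.split₀.go [] cur acc
      = if cur.isEmpty = true then acc.reverse else (cur.reverse :: acc).reverse := by
  rw [PySem.Chars.split₀.go]

-- pushing a whole alnum run through go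
theorem go_run : ∀ (t : List Char), (∀ c ∈ t, PySem.Chars.isalnum c = true) →
    ∀ (rest cur : List Char) (acc : List (List Char)),
    PySem.Chars.split₀.go (t.map pvF ++ rest) cur acc
      = PySem.Chars.split₀.go rest ((t.map pvF).reverse ++ cur) acc := by
  intro t
  induction t with
  | nil => intro _ rest cur acc; simp
  | cons c t ih =>
    intro ht rest cur acc
    have hc : PySem.Chars.isalnum c = true := ht c (by simp)
    have hsp : PySem.Chars.isspace (pvF c) = false := by
      rw [pvF_alnum c hc]; exact (lower_spec c hc).2
    simp only [List.map_cons, List.cons_append, PySem.Chars.split₀.go, hsp,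
      Bool.false_eq_true, ite_false]
    rw [ih (fun x hx => ht x (by simp [hx])) rest (pvF c :: cur) acc]
    simp

theorem split₀_map (cs : List Char) :
    PySem.Chars.split₀ (cs.map pvF) = (runsL cs).map (List.map PySem.Chars.lowerChar) := by
  suffices h : ∀ n cs, List.length cs ≤ n → ∀ acc,
      PySem.Chars.split₀.go (List.map pvF cs) [] acc
        = acc.reverse ++ (runsL cs).map (List.map PySem.Chars.lowerChar) by
    have := h cs.length cs le_rfl []
    simpa [PySem.Chars.split₀] using this
  intro n
  induction n with
  | zero =>
    intro cs hn acc
    match cs with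
    | [] => simp [PySem.Chars.split₀.go, runsL]
    | _ :: _ => simp at hn
  | succ n ih =>
    intro cs hn acc
    match cs with
    | [] => simp [PySem.Chars.split₀.go, runsL]
    | c :: cs' =>
      by_cases hc : PySem.Chars.isalnum c
      · -- an alnum run starts here
        have hsplit : c :: cs' = (c :: cs'.takeWhile PySem.Chars.isalnum)
            ++ cs'.dropWhile PySem.Chars.isalnum := by
          simp [List.takeWhile_append_dropWhile]
        have htal : ∀ x ∈ c :: cs'.takeWhile PySem.Chars.isalnum,
            PySem.Chars.isalnum x = true := by
          intro x hx
          rw [List.mem_cons] at hx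
          rcases hx with hx | hx
          · exact hx ▸ hc
          · exact List.mem_takeWhile_imp hx
        have hruns : runsL (c :: cs')
            = (c :: cs'.takeWhile PySem.Chars.isalnum) :: runsL (cs'.dropWhile PySem.Chars.isalnum) := by
          rw [runsL, if_pos hc]
        have hmap : (c :: cs'.takeWhile PySem.Chars.isalnum).map pvF
            = (c :: cs'.takeWhile PySem.Chars.isalnum).map PySem.Chars.lowerChar :=
          List.map_congr_left fun x hx => pvF_alnum x (htal x hx)
        conv_lhs => rw [hsplit]
        rw [List.map_append, go_run _ htal _ [] acc]
        match hr : cs'.dropWhile PySem.Chars.isalnum with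
        | [] =>
          have htne : ((c :: cs'.takeWhile PySem.Chars.isalnum).map pvF).reverse.isEmpty = false := by
            simp
          rw [List.map_nil, List.append_nil, go_nil, if_neg (by simp), hruns, hr]
          simp [hmap, runsL]
        | d :: rest' =>
          have hd : PySem.Chars.isalnum d = false := by
            have := List.head?_dropWhile_not PySem.Chars.isalnum cs'
            rw [hr] at this
            simpa using this
          have hdsp : PySem.Chars.isspace (pvF d) = true := by
            rw [pvF_space d hd]; exact isspace_space
          have htne : ((c :: cs'.takeWhile PySem.Chars.isalnum).map pvF).reverse.isEmpty = false := by
            simp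
          have hlen : rest'.length ≤ n := by
            have h1 : (cs'.dropWhile PySem.Chars.isalnum).length ≤ cs'.length :=
              cs'.length_dropWhile_le _
            rw [hr] at h1
            simp at h1 hn
            omega
          rw [List.map_cons, PySem.Chars.split₀.go]
          simp only [hdsp, ite_true, List.append_nil]
          rw [if_neg (by simp), ih rest' hlen, hruns, hr, runsL_cons_sep d rest' hd]
          simp [hmap]
      · -- separator
        have hcsp : PySem.Chars.isspace (pvF c) = true := by
          rw [pvF_space c (by simpa using hc)]; exact isspace_space
        simp only [List.map_cons, PySem.Chars.split₀.go, hcsp, ite_true, List.isEmpty_nil]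
        rw [ih cs' (by simp at hn; omega) acc]
        rw [runsL, if_neg hc]

-- ---- A-side: the fold equals bodyA, bodyA renders the runs ----

theorem foldl_bodyA (cs : List Char) : ∀ (acc : List Char) (prev : Bool),
    ((cs.foldl pvStepA (acc, prev)).1) = acc ++ bodyA cs prev := by
  induction cs with
  | nil => intro acc prev; simp [bodyA]
  | cons c cs ih =>
    intro acc prev
    by_cases hc : PySem.Chars.isalnum c
    · simp [pvStepA, hc, bodyA, ih]
    · match prev with
      | false => simp [pvStepA, hc, bodyA, ih]
      | true => simp [pvStepA, hc, bodyA, ih]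

-- a (possibly empty) alnum run prefix is consumed, leaving prev = false
theorem bodyA_run : ∀ (t : List Char), (∀ c ∈ t, PySem.Chars.isalnum c = true) →
    ∀ (rest : List Char), bodyA (t ++ rest) false = t.map PySem.Chars.lowerChar ++ bodyA rest false := by
  intro t
  induction t with
  | nil => intro _ rest; simp
  | cons c t ih =>
    intro ht rest
    have hc := ht c (by simp)
    rw [List.cons_append, bodyA, if_pos hc, ih (fun x hx => ht x (by simp [hx])) rest]
    simp

-- bodyA with prev = true: the joined runs, plus one trailing '_' iff there is a run and the input ends in a separator
theorem bodyA_true (cs : List Char) :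
    bodyA cs true
      = canon cs ++ (if runsL cs ≠ [] ∧ endsSep cs = true then ['_'] else []) := by
  suffices h : ∀ n cs, List.length cs ≤ n →
      bodyA cs true = canon cs ++ (if runsL cs ≠ [] ∧ endsSep cs = true then ['_'] else []) from
    h cs.length cs le_rfl
  intro n
  induction n with
  | zero =>
    intro cs hn
    match cs with
    | [] => simp [bodyA, canon, runsL, endsSep, PySem.Chars.join, List.intercalate]
    | _ :: _ => simp at hn
  | succ n ih =>
    intro cs hn
    match cs with
    | [] => simp [bodyA, canon, runsL, endsSep, PySem.Chars.join, List.intercalate]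
    | c :: cs' =>
      by_cases hc : PySem.Chars.isalnum c
      · -- an alnum run starts here
        have hsplit : cs' = cs'.takeWhile PySem.Chars.isalnum ++ cs'.dropWhile PySem.Chars.isalnum :=
          (List.takeWhile_append_dropWhile).symm
        have htal : ∀ x ∈ c :: cs'.takeWhile PySem.Chars.isalnum, PySem.Chars.isalnum x = true := by
          intro x hx
          rw [List.mem_cons] at hx
          rcases hx with hx | hx
          · exact hx ▸ hc
          · exact List.mem_takeWhile_imp hx
        have hruns : runsL (c :: cs')
            = (c :: cs'.takeWhile PySem.Chars.isalnum) :: runsL (cs'.dropWhile PySem.Chars.isalnum) := by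
          rw [runsL, if_pos hc]
        have hbody : bodyA (c :: cs') true
            = (c :: cs'.takeWhile PySem.Chars.isalnum).map PySem.Chars.lowerChar
              ++ bodyA (cs'.dropWhile PySem.Chars.isalnum) false := by
          rw [bodyA, if_pos hc]
          conv_lhs => rw [hsplit]
          rw [bodyA_run _ (fun x hx => htal x (by simp [hx])) _]
          simp
        rw [hbody]
        match hr : cs'.dropWhile PySem.Chars.isalnum with
        | [] =>
          have hcssplit : c :: cs' = (c :: cs'.takeWhile PySem.Chars.isalnum) ++ [] := by
            rw [List.append_nil, List.cons_inj_right]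
            conv_lhs => rw [hsplit, hr]
            simp
          have hes : endsSep (c :: cs') = false := by
            rw [hcssplit, List.append_nil]
            exact endsSep_all_alnum _ (by simp) htal
          rw [hes]
          simp only [bodyA, List.append_nil, canon, hruns, hr]
          simp [PySem.Chars.join, List.intercalate, runsL]
        | d :: rest' =>
          have hd : PySem.Chars.isalnum d = false := by
            have := List.head?_dropWhile_not PySem.Chars.isalnum cs'
            rw [hr] at this
            simpa using this
          have hlen : rest'.length ≤ n := by
            have h1 : (cs'.dropWhile PySem.Chars.isalnum).length ≤ cs'.length :=
              cs'.length_dropWhile_le _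
            rw [hr] at h1
            simp at h1 hn
            omega
          have hbody2 : bodyA (d :: rest') false = '_' :: bodyA rest' true := by
            rw [bodyA, if_neg (by simp [hd])]
            simp
          rw [hbody2, ih rest' hlen]
          have hcs : c :: cs' = (c :: cs'.takeWhile PySem.Chars.isalnum) ++ (d :: rest') := by
            rw [List.cons_append, ← hr, ← hsplit]
          have hes : endsSep (c :: cs') = endsSep (d :: rest') := by
            rw [hcs]
            exact endsSep_append_right _ _ (by simp)
          by_cases hrn : runsL rest' = []
          · -- everything after the run is separators
            have hallsep : ∀ x ∈ d :: rest', PySem.Chars.isalnum x = false := by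
              intro x hx
              rw [List.mem_cons] at hx
              rcases hx with hx | hx
              · exact hx ▸ hd
              · exact (runsL_nil_iff rest').mp hrn x hx
            have hes2 : endsSep (d :: rest') = true := endsSep_all_sep _ (by simp) hallsep
            rw [canon_nil_of_runsL_nil rest' hrn]
            have hcanon : canon (c :: cs')
                = (c :: cs'.takeWhile PySem.Chars.isalnum).map PySem.Chars.lowerChar := by
              simp [canon, hruns, hr, runsL_cons_sep d rest' hd, hrn,
                PySem.Chars.join, List.intercalate]
            rw [hcanon, hes, hes2, hruns, hr, runsL_cons_sep d rest' hd, hrn]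
            simp
          · have hcanon : canon (c :: cs')
                = (c :: cs'.takeWhile PySem.Chars.isalnum).map PySem.Chars.lowerChar
                  ++ '_' :: canon rest' := by
              rw [canon, hruns, hr, runsL_cons_sep d rest' hd]
              match hL : runsL rest' with
              | [] => exact absurd hL hrn
              | r :: rs =>
                simp [PySem.Chars.join, intercalate_cc, canon, hL]
            rw [hcanon, hes]
            have hrle : rest' ≠ [] := by
              intro h0
              rw [h0] at hrn
              exact hrn (by simp [runsL])
            rw [endsSep_cons d rest' hrle]
            simp only [hruns, hr, runsL_cons_sep d rest' hd]
            simp [hrn]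
      · -- separator with prev = true: dropped
        rw [bodyA, if_neg (by simp [hc]), if_neg (by simp)]
        rw [ih cs' (by simp at hn; omega)]
        rw [canon_cons_sep c cs' (by simpa using hc), runsL_cons_sep c cs' (by simpa using hc)]
        match hcs' : cs' with
        | [] => simp [canon, runsL, endsSep, PySem.Chars.join, List.intercalate, bodyA]
        | d :: cs'' => rw [endsSep_cons c (d :: cs'') (by simp)]

-- ---- stripping the at-most-one '_' of padding around the canon core ----

theorem strip_pad (core pre pad : List Char)
    (hpre : pre = [] ∨ pre = ['_']) (hpad : pad = [] ∨ pad = ['_'])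
    (hh : ∃ c t, core = c :: t ∧ c ≠ '_') (hl : ∃ c t, core.reverse = c :: t ∧ c ≠ '_') :
    PySem.Chars.stripChars (pre ++ core ++ pad) ['_'] = core := by
  obtain ⟨c, t, hct, hc⟩ := hh
  obtain ⟨d, u, hdu, hd⟩ := hl
  show (List.dropWhile (fun c => List.contains ['_'] c)
      ((List.dropWhile (fun c => List.contains ['_'] c) (pre ++ core ++ pad)).reverse)).reverse = core
  have h1 : List.dropWhile (fun c => List.contains ['_'] c) (pre ++ core ++ pad) = core ++ pad := by
    rw [List.append_assoc, List.dropWhile_append]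
    rcases hpre with h | h <;> subst h <;>
      simp [hct, List.dropWhile_cons, hc]
  rw [h1, List.reverse_append]
  have h2 : List.dropWhile (fun c => List.contains ['_'] c) (pad.reverse ++ core.reverse) = core.reverse := by
    rw [List.dropWhile_append]
    rcases hpad with h | h <;> subst h <;>
      simp [hdu, List.dropWhile_cons, hd]
  rw [h2, List.reverse_reverse]

-- ---- main equation on character lists ----

theorem mainEq (cs : List Char) :
    PySem.Chars.stripChars (bodyA cs false) ['_'] = canon cs := by
  match cs with
  | [] => simp [bodyA, canon, runsL, PySem.Chars.join, List.intercalate, PySem.Chars.stripChars]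
  | c :: cs' =>
    by_cases hc : PySem.Chars.isalnum c
    · have hb : bodyA (c :: cs') false = bodyA (c :: cs') true := by
        rw [bodyA, bodyA, if_pos hc, if_pos hc]
      rw [hb, bodyA_true]
      have hrn : runsL (c :: cs') ≠ [] := by
        rw [runsL, if_pos hc]; simp
      obtain ⟨hh, hl⟩ := canon_ends _ hrn
      have := strip_pad (canon (c :: cs')) []
        (if runsL (c :: cs') ≠ [] ∧ endsSep (c :: cs') = true then ['_'] else [])
        (Or.inl rfl) (by split <;> simp) hh hl
      simpa using this
    · have hb : bodyA (c :: cs') false = '_' :: bodyA cs' true := by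
        rw [bodyA, if_neg (by simp [hc])]
        simp
      rw [hb, bodyA_true, canon_cons_sep c cs' (by simpa using hc)]
      by_cases hrn : runsL cs' = []
      · rw [canon_nil_of_runsL_nil cs' hrn]
        simp only [hrn, ne_eq, not_true_eq_false, false_and, ite_false, List.append_nil]
        decide
      · obtain ⟨hh, hl⟩ := canon_ends cs' hrn
        have := strip_pad (canon cs') ['_']
          (if runsL cs' ≠ [] ∧ endsSep cs' = true then ['_'] else [])
          (Or.inr rfl) (by split <;> simp) hh hl
        simpa using this

-- ===== VERDICT (by name: the statement is the Claim_ definition above) =====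
theorem normalize_observation_key_py_spec : Claim_equal_normalize_observation_key_py := by
  intro key _
  show String.ofList (PySem.Chars.stripChars
      ((PySem.Str.strip key).toList.foldl pvStepA ([], false)).1 ['_'])
    = String.ofList (PySem.Chars.join ['_']
      (PySem.Chars.split₀ ((PySem.Str.strip key).toList.map pvF)))
  rw [foldl_bodyA _ [] false, List.nil_append, mainEq, canon, ← split₀_map]
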